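-- pv_equiv track=rewrite | github.com/SHA-Arg/Carpeta-Programacion-I | Programacion I/2)- ARRAYS/3- Practica de Matrices/Package_Modules/Funciones.py | generar_legajos
-- ===== SOURCE A (Python) =====
-- def generar_legajos(filas, columnas):
--     inicio = 1000
--     legajos = []
--     for i in range(filas):
--         nueva_fila = []
--         for j in range(columnas):
--             nueva_fila += [inicio]
--             inicio += 1
--         legajos += [nueva_fila]
--     return legajos
-- ===== SOURCE B (Python) =====
-- def generar_legajos(filas, columnas):
--     # Stage 1: materialise ONE flat block of all consecutive ids;
--     # Stage 2: cut that block into rows by slicing.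
--     nrows = max(filas, 0)
--     width = max(columnas, 0)
--     flat = list(range(1000, 1000 + nrows * width))
--     return [flat[k * width:(k + 1) * width] for k in range(nrows)]
-- ===== Notes on version B (the rewrite author's own statement) =====
-- stated objective: alternative
-- what changed: Instead of threading a mutable counter through nested element-by-element appends, B materialises the whole block of consecutive ids as one flat range and then cuts it into rows by slicing (flatten-then-chunk, two staged passes).
import Mathlib
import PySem

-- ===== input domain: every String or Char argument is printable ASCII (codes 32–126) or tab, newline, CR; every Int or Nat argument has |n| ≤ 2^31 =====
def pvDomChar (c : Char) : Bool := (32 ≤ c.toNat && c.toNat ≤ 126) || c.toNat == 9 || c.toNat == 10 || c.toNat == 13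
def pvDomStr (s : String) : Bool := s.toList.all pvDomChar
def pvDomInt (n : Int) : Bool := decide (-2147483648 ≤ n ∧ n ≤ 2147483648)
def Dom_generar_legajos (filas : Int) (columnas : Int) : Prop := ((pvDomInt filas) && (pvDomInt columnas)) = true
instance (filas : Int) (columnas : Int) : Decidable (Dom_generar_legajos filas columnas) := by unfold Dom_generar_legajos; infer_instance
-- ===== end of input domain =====

-- B builds the whole block of ids once as a flat range and then cuts it into rows by slicing,
-- instead of A's element-by-element appends with a threaded counter.


-- ===== PORT A =====
-- literal port: outer state (inicio, legajos); inner state (nueva_fila, inicio)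
def generar_legajos (filas : Int) (columnas : Int) : List (List Int) :=
  let st :=
    (PySem.List.pyRange 0 filas 1).foldl
      (fun (st : Int × List (List Int)) _i =>
        let inner :=
          (PySem.List.pyRange 0 columnas 1).foldl
            (fun (p : List Int × Int) _j => (p.1 ++ [p.2], p.2 + 1))
            ([], st.1)
        (inner.2, st.2 ++ [inner.1]))
      (1000, [])
  st.2

-- ===== PORT B =====
-- flat block of all ids, then one slice per row
def generar_legajos_alt (filas : Int) (columnas : Int) : List (List Int) :=
  let nrows := max filas 0
  let width := max columnas 0
  let flat := PySem.List.pyRange 1000 (1000 + nrows * width) 1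
  (PySem.List.pyRange 0 nrows 1).map (fun k =>
    PySem.List.slice flat (some (k * width)) (some ((k + 1) * width)))

-- ===== PRECONDITION & SPEC =====
def Spec_generar_legajos (filas : Int) (columnas : Int) (out : List (List Int)) : Prop := out = generar_legajos_alt filas columnas
instance (filas : Int) (columnas : Int) (out : List (List Int)) : Decidable (Spec_generar_legajos filas columnas out) := by unfold Spec_generar_legajos; infer_instance

-- ===== CLAIM (what is proved, stated in full; the proofs are below) =====
def Claim_equal_generar_legajos : Prop := ∀ (filas : Int) (columnas : Int), Dom_generar_legajos filas columnas → Spec_generar_legajos filas columnas (generar_legajos filas columnas)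

-- ===== LEMMAS AND PROOFS =====

-- A's inner loop builds pyRange s (s+n) 1 and advances the counter by n
theorem inner_loop_eq (n : Nat) (row : List Int) (s : Int) :
    (List.range n).foldl (fun (p : List Int × Int) _j => (p.1 ++ [p.2], p.2 + 1)) (row, s)
    = (row ++ PySem.List.pyRange s (s + n) 1, s + n) := by
  induction n generalizing row s with
  | zero =>
    simp only [List.range_zero, List.foldl_nil, Nat.cast_zero, add_zero]
    rw [PySem.List.pyRange_one_eq_nil (by omega)]
    simp
  | succ k ih =>
    rw [List.range_succ, List.foldl_append, ih]
    simp only [List.foldl_cons, List.foldl_nil, Prod.mk.injEq]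
    have h : PySem.List.pyRange s (s + (k:Int) + 1) 1
        = PySem.List.pyRange s (s + (k:Int)) 1 ++ [s + (k:Int)] :=
      PySem.List.pyRange_one_succ_right (by omega)
    constructor
    · rw [show s + ((k:Nat)+1 : Nat) = s + (k:Int) + 1 by push_cast; ring, h, List.append_assoc]
    · push_cast; ring

-- A's outer loop: the result is the canonical list of closed-form rows
theorem outer_loop_eq (c : Int) (m : Nat) :
    (List.range m).foldl
      (fun (st : Int × List (List Int)) _i =>
        let inner :=
          (PySem.List.pyRange 0 c 1).foldl
            (fun (p : List Int × Int) _j => (p.1 ++ [p.2], p.2 + 1))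
            ([], st.1)
        (inner.2, st.2 ++ [inner.1]))
      (1000, [])
    = ((1000 : Int) + (m : Int) * (c.toNat : Int),
       (List.range m).map (fun (i : Nat) =>
          PySem.List.pyRange (1000 + (i : Int) * (c.toNat : Int))
            (1000 + (i : Int) * (c.toNat : Int) + (c.toNat : Int)) 1)) := by
  induction m with
  | zero => simp
  | succ k ih =>
    rw [List.range_succ, List.foldl_append, ih, List.map_append]
    simp only [List.foldl_cons, List.foldl_nil, List.map_cons, List.map_nil]
    rw [show PySem.List.pyRange 0 c 1
        = (List.range c.toNat).map (fun (j : Nat) => (0 : Int) + (j : Int)) by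
          have := PySem.List.pyRange_one 0 c; simpa using this,
       List.foldl_map, inner_loop_eq]
    simp only [Prod.mk.injEq, List.nil_append]
    refine ⟨by push_cast; ring, ?_⟩
    push_cast

-- a w-wide window of a flat range at offset j is itself a range
theorem chunk_of_pyRange (s : Int) (j w N : Nat) (h : j + w ≤ N) :
    ((PySem.List.pyRange s (s + (N : Int)) 1).drop j).take w
    = PySem.List.pyRange (s + (j : Int)) (s + (j : Int) + (w : Int)) 1 := by
  rw [PySem.List.pyRange_one_append s (s + (j : Int)) (s + (N : Int)) (by omega) (by omega)]
  rw [List.drop_left' (by rw [PySem.List.length_pyRange_one]; omega)]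
  rw [PySem.List.pyRange_one_append (s + (j : Int)) (s + (j : Int) + (w : Int))
        (s + (N : Int)) (by omega) (by omega)]
  exact List.take_left' (by rw [PySem.List.length_pyRange_one]; omega)

-- range(x) as a mapped List.range, for the rewrites below
theorem range_zero_eq (x : Int) :
    PySem.List.pyRange 0 x 1 = (List.range x.toNat).map (fun k : Nat => (0 : Int) + (k : Int)) := by
  rw [PySem.List.pyRange_one 0 x, show (x - 0).toNat = x.toNat by omega]

theorem range_zero_eq_nat (n : Nat) :
    PySem.List.pyRange 0 (n : Int) 1 = (List.range n).map (fun k : Nat => (0 : Int) + (k : Int)) := by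
  rw [range_zero_eq, Int.toNat_natCast]

-- ===== VERDICT (by name: the statement is the Claim_ definition above) =====
theorem generar_legajos_spec : Claim_equal_generar_legajos := by
  intro filas columnas _
  unfold Spec_generar_legajos generar_legajos generar_legajos_alt
  have hf : max filas 0 = ((filas.toNat : Nat) : Int) := by omega
  have hc : max columnas 0 = ((columnas.toNat : Nat) : Int) := by omega
  simp only [hf, hc]
  rw [range_zero_eq filas, range_zero_eq_nat filas.toNat, List.foldl_map, List.map_map]
  rw [outer_loop_eq columnas filas.toNat]
  simp only []
  apply List.map_congr_left
  intro k hk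
  simp only [Function.comp]
  have hkm : k < filas.toNat := List.mem_range.mp hk
  rw [show ((0 : Int) + (k : Int)) * ((columnas.toNat : Nat) : Int)
        = ((k * columnas.toNat : Nat) : Int) by push_cast; ring,
      show ((0 : Int) + (k : Int) + 1) * ((columnas.toNat : Nat) : Int)
        = (((k + 1) * columnas.toNat : Nat) : Int) by push_cast; ring,
      PySem.List.slice_natCast,
      show (1000 : Int) + ((filas.toNat : Nat) : Int) * ((columnas.toNat : Nat) : Int)
        = 1000 + ((filas.toNat * columnas.toNat : Nat) : Int) by push_cast; ring,
      show (k + 1) * columnas.toNat - k * columnas.toNat = columnas.toNat by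
        rw [Nat.succ_mul]; omega,
      chunk_of_pyRange 1000 (k * columnas.toNat) columnas.toNat
        (filas.toNat * columnas.toNat) (by nlinarith)]
  push_cast
  ring_nf
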